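-- pv_equiv track=rewrite | github.com/phuong27102000/NTRU_HRSS_KEM_SV | Draft_Phuong/ternary/poly.py | r2_mul_2nd
-- ===== SOURCE A (Python) =====
-- def r2_mul_2nd(a,b,n):
-- #len(a) = len(b)
--     out=[]
--     for k in range(0,n):
--         out += [0]
--         j = k
--         for i in range(0,n):
--             if j==-1: j = n-1
--             out[k] += a[i]*b[j]
--             out[k] &= 1
--             j = j-1
--     return out
-- ===== SOURCE B (Python) =====
-- def r2_mul_2nd(a, b, n):
--     # bit-packed GF(2) cyclic convolution: pack b's parity bits into one int,
--     # XOR shifted copies for each odd a[i], fold the top half back (cyclic), unpack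
--     if n <= 0:
--         return []
--     B = 0
--     for j in range(n):
--         B |= (b[j] & 1) << j
--     P = 0
--     for i in range(n):
--         if a[i] & 1:
--             P ^= B << i
--     R = (P ^ (P >> n)) & ((1 << n) - 1)
--     return [(R >> k) & 1 for k in range(n)]
-- ===== Notes on version B (the rewrite author's own statement) =====
-- stated objective: faster
-- what changed: B replaces A's O(n^2) masked scalar multiply-accumulate double loop by a bit-packed GF(2) polynomial multiply: b's parity bits are packed into one big integer, one shifted XOR is done per odd coefficient of a (even ones are skipped entirely), and the cyclic wrap-around is a single shift-XOR-mask before unpacking the result bits.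
import Mathlib
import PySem

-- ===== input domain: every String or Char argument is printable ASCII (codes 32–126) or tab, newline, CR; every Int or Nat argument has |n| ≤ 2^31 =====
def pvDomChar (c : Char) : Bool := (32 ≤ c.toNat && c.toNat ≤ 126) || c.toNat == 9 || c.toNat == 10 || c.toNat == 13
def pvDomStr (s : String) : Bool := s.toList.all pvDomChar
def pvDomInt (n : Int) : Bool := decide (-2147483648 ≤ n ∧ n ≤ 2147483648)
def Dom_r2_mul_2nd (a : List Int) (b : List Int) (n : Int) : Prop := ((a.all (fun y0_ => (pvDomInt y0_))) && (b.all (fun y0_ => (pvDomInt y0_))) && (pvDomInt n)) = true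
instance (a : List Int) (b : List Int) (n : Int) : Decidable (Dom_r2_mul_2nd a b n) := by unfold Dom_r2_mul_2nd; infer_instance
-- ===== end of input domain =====

-- B replaces A's O(n^2) masked multiply-accumulate double loop by a bit-packed GF(2)
-- polynomial multiply (pack b's parity bits, XOR one shifted copy per odd a[i],
-- fold the top half back for the cyclic wrap, unpack).

-- ===== PORT A =====
-- A appends 0 to out, then repeatedly updates only that last cell out[k]; the port
-- carries that cell (together with j) as the inner fold state and appends it at the end.
def r2_mul_2nd (a : List Int) (b : List Int) (n : Int) : List Int :=
  (PySem.List.pyRange 0 n 1).foldl (fun out k =>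
    let s := (PySem.List.pyRange 0 n 1).foldl
      (fun (st : Int × Int) i =>
        let j := if st.2 = -1 then n - 1 else st.2
        (PySem.Int.band (st.1 + PySem.List.pyGetD a i 0 * PySem.List.pyGetD b j 0) 1, j - 1))
      (0, k)
    out ++ [s.1]) []

-- ===== PORT B =====
-- B |= (b[j] & 1) << j   for j in range(n)   (Pre_ makes b[j] in range, so getD is exact)
def pvPack (b : List Int) (t : Nat) : Nat :=
  (List.range t).foldl (fun acc j => acc ||| ((PySem.Int.band (b.getD j 0) 1).toNat <<< j)) 0

-- if a[i] & 1: P ^= B << i   for i in range(n)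
def pvXorShifts (a : List Int) (B : Nat) (t : Nat) : Nat :=
  (List.range t).foldl (fun acc i => if PySem.Int.band (a.getD i 0) 1 ≠ 0 then acc ^^^ (B <<< i) else acc) 0

def r2_mul_2nd_alt (a : List Int) (b : List Int) (n : Int) : List Int :=
  if n ≤ 0 then []
  else
    let N := n.toNat
    let B := pvPack b N
    let P := pvXorShifts a B N
    let R := (P ^^^ (P >>> N)) &&& ((1 <<< N) - 1)
    List.map (fun k : Nat => (((R >>> k) &&& 1 : Nat) : Int)) (List.range N)

-- ===== PRECONDITION & SPEC =====
-- Python A raises IndexError when n exceeds the length of a or b (it reads a[i], b[j]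
-- for all 0 ≤ i, j < n); Pre_ excludes exactly those inputs.
def Pre_r2_mul_2nd (a : List Int) (b : List Int) (n : Int) : Prop :=
  n ≤ (a.length : Int) ∧ n ≤ (b.length : Int)
instance (a : List Int) (b : List Int) (n : Int) : Decidable (Pre_r2_mul_2nd a b n) := by
  unfold Pre_r2_mul_2nd; infer_instance

def pvWitness_r2_mul_2nd : List Int × List Int × Int := ([1, 0, 1], [1, 1, 0], 3)

def Spec_r2_mul_2nd (a : List Int) (b : List Int) (n : Int) (out : List Int) : Prop := out = r2_mul_2nd_alt a b n
instance (a : List Int) (b : List Int) (n : Int) (out : List Int) : Decidable (Spec_r2_mul_2nd a b n out) := by unfold Spec_r2_mul_2nd; infer_instance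

-- ===== CLAIM (what is proved, stated in full; the proofs are below) =====
def Claim_equal_r2_mul_2nd : Prop := ∀ (a : List Int) (b : List Int) (n : Int), Dom_r2_mul_2nd a b n → Pre_r2_mul_2nd a b n → Spec_r2_mul_2nd a b n (r2_mul_2nd a b n)

-- ===== LEMMAS AND PROOFS =====

-- The common mathematical value of entry k (0 ≤ k < N): the running sum
-- Σ_{i<t} a[i]·b[(k-i) mod N], reduced mod 2 at every step, exactly as A computes it.
def pvJ (N k t : Nat) : Nat := (((k : Int) - (t : Int)) % (N : Int)).toNat

def pvSum (a b : List Int) (N k : Nat) (t : Nat) : Int :=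
  (List.range t).foldl (fun s i => (s + a.getD i 0 * b.getD (pvJ N k i) 0) % 2) 0

-- ---- generic small facts ----
theorem pv_band_one (x : Int) : PySem.Int.band x 1 = x % 2 := by
  rw [PySem.Int.band_one]; simp [PySem.Int.mod, Int.fmod_eq_emod]

theorem pv_and_one (x k : Nat) : (x >>> k) &&& 1 = if x.testBit k then 1 else 0 := by
  simp only [Nat.and_one_is_mod, Nat.testBit]
  rcases Nat.mod_two_eq_zero_or_one (x >>> k) with h | h <;> simp [h]

theorem pv_pyRange_eq (n : Int) :
    PySem.List.pyRange 0 n 1 = List.map (fun k : Nat => (k : Int)) (List.range n.toNat) := by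
  rw [PySem.List.pyRange_one, Int.sub_zero]
  exact List.map_congr_left (fun x _ => by ring)

theorem pv_testBit_one (s : Nat) : Nat.testBit 1 s = decide (s = 0) := by
  cases s with
  | zero => decide
  | succ t => simp [Nat.testBit_succ]

-- ---- bits of the packed integer pvPack ----
theorem pvPack_testBit (b : List Int) (t m : Nat) :
    (pvPack b t).testBit m = (decide (m < t) && decide ((b.getD m 0) % 2 = 1)) := by
  induction t with
  | zero => simp [pvPack]
  | succ t ih =>
    unfold pvPack at *
    rw [List.range_succ, List.foldl_append]
    simp only [List.foldl_cons, List.foldl_nil]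
    rw [Nat.testBit_or, ih, Nat.testBit_shiftLeft, pv_band_one]
    by_cases hmt : m = t
    · subst hmt
      rcases Int.emod_two_eq_zero_or_one (b.getD m 0) with h | h <;>
        rw [h] <;> simp
    · by_cases hlt : m < t
      · have h2 : decide (t ≤ m) = false := by simp; omega
        simp [hlt, h2, show m < t + 1 by omega]
      · rcases Int.emod_two_eq_zero_or_one (b.getD t 0) with h | h <;>
          rw [h] <;>
          simp [Nat.zero_testBit, pv_testBit_one, show ¬ m < t by omega,
                show ¬ m < t + 1 by omega]
        omega

-- ---- bits of the xor accumulator: a parity fold ----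
def pvPar (a : List Int) (B : Nat) (m : Nat) (t : Nat) : Bool :=
  (List.range t).foldl
    (fun p i => p.xor (decide ((a.getD i 0) % 2 = 1) && (decide (i ≤ m) && B.testBit (m - i)))) false

theorem pvXorShifts_testBit (a : List Int) (B : Nat) (t m : Nat) :
    (pvXorShifts a B t).testBit m = pvPar a B m t := by
  induction t with
  | zero => simp [pvXorShifts, pvPar]
  | succ t ih =>
    unfold pvXorShifts pvPar at *
    rw [List.range_succ, List.foldl_append, List.foldl_append]
    simp only [List.foldl_cons, List.foldl_nil]
    rcases Int.emod_two_eq_zero_or_one (a.getD t 0) with h | h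
    · rw [if_neg (by rw [pv_band_one, h]; simp), ih, h]
      simp
    · rw [if_pos (by rw [pv_band_one, h]; decide), Nat.testBit_xor, ih,
          Nat.testBit_shiftLeft, h]
      simp [Bool.xor_comm]

-- ---- step of the Int index (k - t) mod N ----
theorem pv_emod_pos (N : Nat) (hN : 0 < N) (x : Int) :
    0 ≤ x % (N : Int) ∧ x % (N : Int) < N := by
  constructor
  · exact Int.emod_nonneg x (by exact_mod_cast Nat.pos_iff_ne_zero.mp hN)
  · exact Int.emod_lt_of_pos x (by exact_mod_cast hN)

theorem pv_emod_sub_one (N : Nat) (hN : 0 < N) (x : Int) :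
    (x - 1) % (N : Int) = if x % (N : Int) = 0 then (N : Int) - 1 else x % (N : Int) - 1 := by
  have h := pv_emod_pos N hN x
  have hstep : (x - 1) % (N : Int) = (x % (N : Int) - 1) % (N : Int) := by
    rw [Int.sub_emod x 1, Int.sub_emod (x % (N : Int)) 1, Int.emod_emod_of_dvd _ (dvd_refl _)]
  by_cases h0 : x % (N : Int) = 0
  · rw [if_pos h0, hstep, h0]
    have h1 : ((N : Int) - 1) % (N : Int) = (N : Int) - 1 :=
      Int.emod_eq_of_lt (by omega) (by omega)
    calc (0 - 1) % (N : Int) = (0 - 1 + (N:Int) * 1) % (N : Int) := by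
          rw [Int.add_mul_emod_self_left]
      _ = (N : Int) - 1 := by rw [show (0 - 1 + (N:Int)*1) = (N:Int) - 1 by ring]; exact h1
  · rw [if_neg h0, hstep]
    exact Int.emod_eq_of_lt (by omega) (by omega)

-- ---- A's inner loop computes pvSum, with the j register tracking (k - t) mod N ----
theorem pv_inner_invariant (a b : List Int) (N : Nat) (hN : 0 < N) (k : Nat) (hk : k < N)
    (t : Nat) (ht : t ≤ N) :
    (List.range t).foldl
      (fun (st : Int × Int) (i : Nat) =>
        let j := if st.2 = -1 then (N : Int) - 1 else st.2
        (PySem.Int.band (st.1 + PySem.List.pyGetD a (i : Int) 0 * PySem.List.pyGetD b j 0) 1, j - 1))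
      (0, (k : Int))
    = (pvSum a b N k t,
       if t = 0 then (k : Int) else ((k : Int) - (t : Int) + 1) % (N : Int) - 1) := by
  induction t with
  | zero => simp [pvSum]
  | succ t ih =>
    have ht' : t ≤ N := by omega
    rw [List.range_succ, List.foldl_append, ih ht']
    simp only [List.foldl_cons, List.foldl_nil]
    have hj : (if (if t = 0 then (k : Int) else ((k : Int) - (t : Int) + 1) % (N : Int) - 1) = -1
              then (N : Int) - 1
              else (if t = 0 then (k : Int) else ((k : Int) - (t : Int) + 1) % (N : Int) - 1))
            = ((k : Int) - (t : Int)) % (N : Int) := by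
      by_cases h0 : t = 0
      · subst h0
        rw [if_pos rfl, if_neg (show ¬ ((k : Int) = -1) by omega)]
        have h1 : ((k : Int) - ((0 : Nat) : Int)) % (N : Int) = (k : Int) - ((0 : Nat) : Int) :=
          Int.emod_eq_of_lt (by omega) (by omega)
        rw [h1]; omega
      · have hsub : ((k : Int) - (t : Int)) % (N : Int)
            = if ((k : Int) - (t : Int) + 1) % (N : Int) = 0 then (N : Int) - 1
              else ((k : Int) - (t : Int) + 1) % (N : Int) - 1 := by
          have h := pv_emod_sub_one N hN ((k : Int) - (t : Int) + 1)
          simpa using h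
        rw [hsub]
        have h := pv_emod_pos N hN ((k : Int) - (t : Int) + 1)
        split_ifs <;> omega
    rw [hj]
    simp only [Prod.mk.injEq]
    constructor
    · -- sum component
      unfold pvSum
      rw [List.range_succ, List.foldl_append]
      simp only [List.foldl_cons, List.foldl_nil]
      rw [pv_band_one]
      have hb : PySem.List.pyGetD b (((k : Int) - (t : Int)) % (N : Int)) 0 = b.getD (pvJ N k t) 0 := by
        have h := pv_emod_pos N hN ((k : Int) - (t : Int))
        rw [PySem.List.pyGetD_of_nonneg b 0 h.1]
        rfl
      rw [PySem.List.pyGetD_natCast, hb]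
    · -- j component
      rw [if_neg (Nat.succ_ne_zero t)]
      congr 2
      push_cast
      ring

-- ---- the parity fold equals the masked running sum ----
theorem pv_sum_eq_parity (a b : List Int) (N : Nat) (hN : 0 < N) (k : Nat) (hk : k < N)
    (t : Nat) (ht : t ≤ N) :
    pvSum a b N k t
      = if (pvPar a (pvPack b N) k t).xor (pvPar a (pvPack b N) (k + N) t) then 1 else 0 := by
  induction t with
  | zero => simp [pvSum, pvPar]
  | succ t ih =>
    have ht' : t ≤ N := by omega
    have hsum : pvSum a b N k (t + 1)
        = (pvSum a b N k t + a.getD t 0 * b.getD (pvJ N k t) 0) % 2 := by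
      unfold pvSum; rw [List.range_succ, List.foldl_append]; rfl
    have hpar : ∀ m, pvPar a (pvPack b N) m (t + 1)
        = (pvPar a (pvPack b N) m t).xor
            (decide ((a.getD t 0) % 2 = 1) && (decide (t ≤ m) && (pvPack b N).testBit (m - t))) := by
      intro m; unfold pvPar; rw [List.range_succ, List.foldl_append]; rfl
    rw [hsum, hpar, hpar, ih ht']
    -- the two window bits: exactly one of the two pvPar terms can fire, and it is
    -- the b-parity at index pvJ N k t
    have hterm1 : (decide ((a.getD t 0) % 2 = 1) && (decide (t ≤ k) && (pvPack b N).testBit (k - t)))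
                  = (decide ((a.getD t 0) % 2 = 1) && decide (t ≤ k) && decide ((b.getD (pvJ N k t) 0) % 2 = 1)) := by
      rw [pvPack_testBit]
      by_cases hle : t ≤ k
      · have hJ : pvJ N k t = k - t := by
          have h1 : ((k : Int) - (t : Int)) % (N : Int) = (k : Int) - (t : Int) :=
            Int.emod_eq_of_lt (by omega) (by omega)
          unfold pvJ
          rw [h1]
          omega
        simp [hle, hJ, show k - t < N by omega]
      · simp [hle]
    have hterm2 : (decide ((a.getD t 0) % 2 = 1) && (decide (t ≤ k + N) && (pvPack b N).testBit (k + N - t)))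
                  = (decide ((a.getD t 0) % 2 = 1) && decide (¬ (t ≤ k)) && decide ((b.getD (pvJ N k t) 0) % 2 = 1)) := by
      rw [pvPack_testBit]
      by_cases hle : t ≤ k
      · simp [hle, show ¬ (k + N - t < N) by omega, show t ≤ k + N by omega]
      · have h1 : ((k : Int) - (t : Int) + (N : Int)) % (N : Int) = (k : Int) - (t : Int) + (N : Int) :=
          Int.emod_eq_of_lt (by omega) (by omega)
        have h2 : ((k : Int) - (t : Int)) % (N : Int) = ((k : Int) - (t : Int) + (N : Int)) % (N : Int) := by
          conv_rhs => rw [show ((k : Int) - (t : Int) + (N : Int)) = ((k : Int) - (t : Int)) + (N : Int) * 1 by ring]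
          rw [Int.add_mul_emod_self_left]
        have hJ : pvJ N k t = k + N - t := by
          unfold pvJ
          rw [h2, h1]
          omega
        simp [hle, hJ, show k + N - t < N by omega, show t ≤ k + N by omega]
    rw [hterm1, hterm2]
    -- now a plain case analysis on all the booleans involved
    have hab : (a.getD t 0 * b.getD (pvJ N k t) 0) % 2
        = ((a.getD t 0) % 2) * ((b.getD (pvJ N k t) 0) % 2) % 2 := Int.mul_emod _ _ 2
    rcases Int.emod_two_eq_zero_or_one (a.getD t 0) with ha | ha <;>
    rcases Int.emod_two_eq_zero_or_one (b.getD (pvJ N k t) 0) with hb | hb <;>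
    by_cases hle : t ≤ k <;>
    cases hp1 : pvPar a (pvPack b N) k t <;>
    cases hp2 : pvPar a (pvPack b N) (k + N) t <;>
      rw [Int.add_emod, hab, ha, hb] <;>
      simp [hle]

-- ===== VERDICT (by name: the statement is the Claim_ definition above) =====
theorem r2_mul_2nd_spec : Claim_equal_r2_mul_2nd := by
  intro a b n _ hPre
  unfold Spec_r2_mul_2nd
  by_cases hn : n ≤ 0
  · unfold r2_mul_2nd r2_mul_2nd_alt
    rw [if_pos hn, pv_pyRange_eq]
    have : n.toNat = 0 := by omega
    simp [this]
  · have hN : 0 < n.toNat := by omega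
    unfold r2_mul_2nd r2_mul_2nd_alt
    rw [if_neg hn, pv_pyRange_eq, List.foldl_map,
        PySem.List.foldl_append_singleton_eq_map]
    apply List.map_congr_left
    intro k hk
    rw [List.mem_range] at hk
    rw [List.foldl_map]
    have := pv_inner_invariant a b n.toNat hN k hk n.toNat le_rfl
    have hcast : ((n.toNat : Int)) = n := by omega
    rw [hcast] at this
    rw [this]
    -- now the bit value on the B side
    rw [pv_and_one]
    rw [pv_sum_eq_parity a b n.toNat hN k hk n.toNat le_rfl]
    have hmask : (1 <<< n.toNat) - 1 = 2 ^ n.toNat - 1 := by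
      rw [Nat.shiftLeft_eq, one_mul]
    rw [hmask, Nat.testBit_and, Nat.testBit_two_pow_sub_one, Nat.testBit_xor,
        Nat.testBit_shiftRight, pvXorShifts_testBit, pvXorShifts_testBit]
    simp only [hk, decide_true, Bool.and_true, Nat.add_comm n.toNat k]
    split_ifs <;> simp
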